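-- pv_equiv track=rewrite | github.com/BlueBoson/subtitle_rename | sub_rename.py | find_reg_parens
-- ===== SOURCE A (Python) =====
-- def find_reg_parens(string):
--     slices = []
--     count = 0
--     prev_escape = False
--     for i, c in enumerate(string):
--         if c == '(' and not prev_escape:
--             if count == 0:
--                 slices.append([i, i])
--             count += 1
--         elif c == ')' and not prev_escape:
--             count -= 1
--             if count == 0:
--                 slices[-1][-1] = i
--         prev_escape = (c == '\\')
--     return slices
-- ===== SOURCE B (Python) =====
-- def find_reg_parens(string):
--     # pass 1: collect positions of unescaped parens (same one-char-lookback escape rule)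
--     events = []
--     prev_escape = False
--     for i, c in enumerate(string):
--         if c in '()' and not prev_escape:
--             events.append((i, c))
--         prev_escape = (c == '\\')
--     # pass 2: depth matching over the events only
--     slices = []
--     depth = 0
--     for i, c in events:
--         if c == '(':
--             if depth == 0:
--                 slices.append([i, i])
--             depth += 1
--         else:
--             depth -= 1
--             if depth == 0:
--                 slices[-1][-1] = i
--     return slices
-- ===== Notes on version B (the rewrite author's own statement) =====
-- stated objective: alternative
-- what changed: Splits A's single stateful loop into two passes: one that filters out escaped characters and keeps only unescaped paren events, and a second that does pure depth-counting over that event list.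
import Mathlib
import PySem

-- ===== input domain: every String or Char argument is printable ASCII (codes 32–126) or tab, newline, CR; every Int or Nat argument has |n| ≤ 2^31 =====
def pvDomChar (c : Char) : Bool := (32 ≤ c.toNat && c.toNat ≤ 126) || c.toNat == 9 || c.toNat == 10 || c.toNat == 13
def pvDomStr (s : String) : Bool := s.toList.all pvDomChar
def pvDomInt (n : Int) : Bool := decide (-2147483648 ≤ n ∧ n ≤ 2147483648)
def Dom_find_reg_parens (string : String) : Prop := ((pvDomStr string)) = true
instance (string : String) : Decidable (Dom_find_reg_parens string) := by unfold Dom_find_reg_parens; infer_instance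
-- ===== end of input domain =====

-- B: two passes (escape-filtering, then depth-matching) instead of A's single stateful loop; same algorithmic cost.
-- A mutates nothing observable; equivalence is about the return value.

-- ===== PORT A =====
-- slices[-1][-1] = i : replace the last entry of the last slice (only reached with slices nonempty)
def pvSetLastLast (xs : List (List Int)) (i : Int) : List (List Int) :=
  xs.dropLast ++ [(xs.getLastD []).dropLast ++ [i]]

def pvAStep (st : List (List Int) × Int × Bool) (p : Int × Char) : List (List Int) × Int × Bool :=
  let slices := st.1
  let count := st.2.1
  let prev_escape := st.2.2
  let i := p.1
  let c := p.2
  if c = '(' ∧ ¬prev_escape then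
    ((if count = 0 then slices ++ [[i, i]] else slices), count + 1, (c = '\\'))
  else if c = ')' ∧ ¬prev_escape then
    let count' := count - 1
    ((if count' = 0 then pvSetLastLast slices i else slices), count', (c = '\\'))
  else
    (slices, count, (c = '\\'))

def find_reg_parens (string : String) : List (List Int) :=
  ((PySem.List.enumerate string.toList).foldl pvAStep ([], 0, false)).1

-- ===== PORT B =====
-- pass 1 of Source B: the loop that appends unescaped-paren events, as structural recursion over (chars, prev_escape)
def pvEvents : List (Int × Char) → Bool → List (Int × Char)
  | [], _ => []
  | p :: rest, prev_escape =>
    (if (p.2 = '(' ∨ p.2 = ')') ∧ ¬prev_escape then [p] else []) ++ pvEvents rest (p.2 = '\\')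

-- pass 2 of Source B: pure depth matching over the event list
def pvDepthStep (st : List (List Int) × Int) (p : Int × Char) : List (List Int) × Int :=
  let slices := st.1
  let depth := st.2
  let i := p.1
  let c := p.2
  if c = '(' then
    ((if depth = 0 then slices ++ [[i, i]] else slices), depth + 1)
  else
    let depth' := depth - 1
    ((if depth' = 0 then pvSetLastLast slices i else slices), depth')

def find_reg_parens_alt (string : String) : List (List Int) :=
  ((pvEvents (PySem.List.enumerate string.toList) false).foldl pvDepthStep ([], 0)).1

-- ===== PRECONDITION & SPEC =====
def Spec_find_reg_parens (string : String) (out : List (List Int)) : Prop := out = find_reg_parens_alt string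
instance (string : String) (out : List (List Int)) : Decidable (Spec_find_reg_parens string out) := by unfold Spec_find_reg_parens; infer_instance

-- ===== CLAIM (what is proved, stated in full; the proofs are below) =====
def Claim_equal_find_reg_parens : Prop := ∀ (string : String), Dom_find_reg_parens string → Spec_find_reg_parens string (find_reg_parens string)

-- ===== LEMMAS AND PROOFS =====

-- A's fold over the enumerated chars equals B's depth fold over the filtered events, jointly in (slices, count).
lemma pv_key (l : List (Int × Char)) :
    ∀ (s : List (List Int)) (c : Int) (p : Bool),
      ((l.foldl pvAStep (s, c, p)).1, (l.foldl pvAStep (s, c, p)).2.1)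
        = (pvEvents l p).foldl pvDepthStep (s, c) := by
  induction l with
  | nil => intro s c p; simp [pvEvents]
  | cons hd tl ih =>
    intro s c p
    rcases hd with ⟨i, ch⟩
    by_cases hp : p = true
    · -- previous char was a backslash: no event is emitted, A takes its else branch
      simp [List.foldl, pvEvents, pvAStep, hp]
      exact ih _ _ _
    · have hp' : p = false := by simpa using hp
      subst hp'
      by_cases hc1 : ch = '('
      · subst hc1
        simp [List.foldl, pvEvents, pvAStep, pvDepthStep]
        exact ih _ _ _
      · by_cases hc2 : ch = ')'
        · subst hc2
          simp [List.foldl, pvEvents, pvAStep, pvDepthStep]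
          exact ih _ _ _
        · simp [List.foldl, pvEvents, pvAStep, hc1, hc2]
          exact ih _ _ _

-- ===== VERDICT (by name: the statement is the Claim_ definition above) =====
theorem find_reg_parens_spec : Claim_equal_find_reg_parens := by
  intro string _
  unfold Spec_find_reg_parens find_reg_parens find_reg_parens_alt
  exact congrArg Prod.fst (pv_key (PySem.List.enumerate string.toList) [] 0 false)
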